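-- pv_equiv track=rewrite | github.com/Serms1999/AdventOfCode | 2021/Day10/src/day10.py | part1
-- ===== SOURCE A (Python) =====
-- def get_paren_type(char: str) -> str:
--     for paren_type in ['()', '[]', '{}', '<>']:
--         if char in paren_type:
--             return paren_type
--
--     return ''
--
-- def part1(input_lines: list) -> int:
--     ponderation = {
--         '()': 3,
--         '[]': 57,
--         '{}': 1197,
--         '<>': 25137
--     }
--     open_list = []
--     close_list = []
--     for pattern in ponderation:
--         a, b = pattern
--         open_list += [a]
--         close_list += [b]
--
--     total_syntax_error_score = 0
--     for line in input_lines: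
--         stack = []
--         for char in line:
--             if char in open_list:
--                 stack += [char]
--             elif len(stack) > 0 and get_paren_type(stack[len(stack) - 1]) == get_paren_type(char):
--                 stack.pop()
--             else:
--                 total_syntax_error_score += ponderation[get_paren_type(char)]
--                 break
--
--     return total_syntax_error_score
-- ===== SOURCE B (Python) =====
-- # Recursive-descent parser instead of an explicit stack scan.
-- OPEN = {'(': ')', '[': ']', '{': '}', '<': '>'}
-- SCORE = {')': 3, ']': 57, '}': 1197, '>': 25137}
--
--
-- def _seq(line, i):
--     """Parse a maximal run of balanced groups starting at index i.
--
--     Returns the index where parsing stopped (end of line or a char that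
--     cannot start a group here), or ('bad', j) when the char at j closes a
--     group with the wrong closer."""
--     while i < len(line) and line[i] in OPEN:
--         close = OPEN[line[i]]
--         r = _seq(line, i + 1)
--         if isinstance(r, tuple):
--             return r
--         if r == len(line):
--             return r  # line ended inside the group: incomplete, not corrupt
--         if line[r] != close:
--             return ('bad', r)
--         i = r + 1
--     return i
--
--
-- def part1(input_lines: list) -> int:
--     total = 0
--     for line in input_lines:
--         r = _seq(line, 0)
--         if isinstance(r, tuple):
--             total += SCORE[line[r[1]]]
--         elif r < len(line):
--             total += SCORE[line[r]]  # closer (or junk) with nothing open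
--     return total
-- ===== Notes on version B (the rewrite author's own statement) =====
-- stated objective: alternative
-- what changed: Replaces A's explicit open-bracket stack with per-char pair-type lookups by a recursive-descent parser that parses balanced groups by recursion and scores the first char that cannot close its group (or closes nothing), keyed directly by the closing char.
-- outside the precondition, e.g. on part1([')a']): A returns 3, B returns 3
import Mathlib
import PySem

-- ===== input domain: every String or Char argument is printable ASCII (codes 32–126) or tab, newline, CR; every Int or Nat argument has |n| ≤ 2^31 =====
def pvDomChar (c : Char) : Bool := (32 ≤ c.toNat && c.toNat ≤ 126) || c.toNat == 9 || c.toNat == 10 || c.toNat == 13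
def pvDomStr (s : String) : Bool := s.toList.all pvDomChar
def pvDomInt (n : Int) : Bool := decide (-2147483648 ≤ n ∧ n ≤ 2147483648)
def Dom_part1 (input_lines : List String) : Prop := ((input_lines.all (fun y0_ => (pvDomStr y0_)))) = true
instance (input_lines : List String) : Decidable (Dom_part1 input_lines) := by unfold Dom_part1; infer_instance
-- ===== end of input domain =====

-- B replaces A's explicit open-bracket stack (with per-char pair-type lookups) by a
-- recursive-descent parser over balanced groups; same cost, different decomposition.

-- ===== PORT A =====
-- for paren_type in [...]: if char in paren_type: return paren_type;  return ''
-- (the early-return loop is List.find?; 'char in paren_type' is membership in the 2-char string)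
def getParenType (char : Char) : String :=
  match ["()", "[]", "{}", "<>"].find? (fun paren_type => paren_type.toList.contains char) with
  | some paren_type => paren_type
  | none => ""

-- the inner 'for char in line' loop with its break; returns the score added by this line
def lineScoreA (ponderation : PySem.Dict String Int) (open_list : List Char) :
    List Char → List Char → Int
  | [], _stack => 0
  | char :: rest, stack =>
    if open_list.contains char then
      lineScoreA ponderation open_list rest (stack ++ [char])
    else if stack.length > 0 ∧
        getParenType ((PySem.List.pyGet? stack ((stack.length : Int) - 1)).getD ' ')
          = getParenType char then
      -- stack[len(stack)-1] exists because of the length guard, so getD's default is never used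
      lineScoreA ponderation open_list rest stack.dropLast
    else
      -- ponderation[get_paren_type(char)] : KeyError when the key is '' — excluded by Pre_
      ponderation.getD (getParenType char) 0

def part1 (input_lines : List String) : Int :=
  let ponderation : PySem.Dict String Int :=
    PySem.Dict.ofList [("()", 3), ("[]", 57), ("{}", 1197), ("<>", 25137)]
  -- for pattern in ponderation: a, b = pattern; open_list += [a]; close_list += [b]
  -- ('a, b = pattern' unpacks the 2-char key; exact for these literal keys)
  let lists := ponderation.keys.foldl
    (fun (p : List Char × List Char) pattern =>
      match pattern.toList with
      | a :: b :: _ => (p.1 ++ [a], p.2 ++ [b])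
      | _ => p) ([], [])
  let open_list := lists.1
  input_lines.foldl (fun total line => total + lineScoreA ponderation open_list line.toList []) 0

-- ===== PORT B =====
def bOpen : PySem.Dict Char Char :=
  PySem.Dict.ofList [('(', ')'), ('[', ']'), ('{', '}'), ('<', '>')]
def bScore : PySem.Dict Char Int :=
  PySem.Dict.ofList [(')', 3), (']', 57), ('}', 1197), ('>', 25137)]

-- _seq(line, i): the index suffix line[i:] is the list argument; the while loop is the
-- tail call on the returned suffix; .inl b = ('bad', b), .inr r = stopped with suffix r.
-- The fuel parameter only totalizes the recursion (fuel = line length always suffices).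
def seqB : Nat → List Char → Char ⊕ List Char
  | _, [] => .inr []
  | 0, cs => .inr cs
  | fuel + 1, c :: cs =>
    if bOpen.contains c then
      match seqB fuel cs with
      | .inl b => .inl b
      | .inr [] => .inr []                                -- line ended inside the group
      | .inr (d :: rest) =>
        if d = bOpen.getD c ' ' then seqB fuel rest       -- group closed; continue the run
        else .inl d                                       -- wrong closer
    else .inr (c :: cs)

def part1_alt (input_lines : List String) : Int :=
  input_lines.foldl (fun total line =>
    match seqB line.toList.length line.toList with
    | .inl b => total + bScore.getD b 0          -- SCORE[line[r[1]]] : KeyError outside Pre_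
    | .inr [] => total                           -- whole line consumed: incomplete, no score
    | .inr (d :: _) => total + bScore.getD d 0)  -- stray closer with nothing open
    0

-- ===== PRECONDITION & SPEC =====
-- Pre_ admits only lines made of the eight bracket characters: on a line containing any other
-- character A raises KeyError whenever its scan reaches that character, and whether it does
-- depends on earlier corruption, which is not a closed-form condition on the input.
def Pre_part1 (input_lines : List String) : Prop :=
  ∀ line ∈ input_lines,
    (line.toList.all (fun c => c ∈ ['(', ')', '[', ']', '{', '}', '<', '>'])) = true
instance (input_lines : List String) : Decidable (Pre_part1 input_lines) := by
  unfold Pre_part1; infer_instance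

def pvWitness_part1 : List String := ["(]"]

def Spec_part1 (input_lines : List String) (out : Int) : Prop := out = part1_alt input_lines
instance (input_lines : List String) (out : Int) : Decidable (Spec_part1 input_lines out) := by
  unfold Spec_part1; infer_instance

-- ===== CLAIM (what is proved, stated in full; the proofs are below) =====
def Claim_equal_part1 : Prop := ∀ (input_lines : List String), Dom_part1 input_lines → Pre_part1 input_lines → Spec_part1 input_lines (part1 input_lines)

-- ===== LEMMAS AND PROOFS =====

-- proof-side canonical scan: stack of EXPECTED closers, head = innermost
def closeOf (c : Char) : Char := bOpen.getD c ' '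

def scan : List Char → List Char → Option Char
  | [], _ => none
  | c :: cs, es =>
    if bOpen.contains c then scan cs (closeOf c :: es)
    else match es with
      | [] => some c
      | e :: es' => if c = e then scan cs es' else some c

def brackets : List Char := ['(', ')', '[', ']', '{', '}', '<', '>']
def openers : List Char := ['(', '[', '{', '<']

def pondLit : PySem.Dict String Int :=
  PySem.Dict.ofList [("()", 3), ("[]", 57), ("{}", 1197), ("<>", 25137)]

theorem open_bOpen (c : Char) (hc : c ∈ brackets) : bOpen.contains c = openers.contains c := by
  fin_cases hc <;> decide

theorem score_eq (c : Char) (hc : c ∈ brackets) (ho : openers.contains c = false) :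
    pondLit.getD (getParenType c) 0 = bScore.getD c 0 := by
  fin_cases hc <;> first | exact absurd ho (by decide) | decide

theorem pop_iff (t c : Char) (ht : t ∈ openers) (hc : c ∈ brackets)
    (ho : openers.contains c = false) :
    (getParenType t = getParenType c) ↔ (c = closeOf t) := by
  fin_cases ht <;> fin_cases hc <;> first | exact absurd ho (by decide) | decide

theorem A_line (cs : List Char) (hcs : ∀ c ∈ cs, c ∈ brackets) :
    ∀ stack : List Char, (∀ c ∈ stack, c ∈ openers) →
    lineScoreA pondLit openers cs stack =
      match scan cs ((stack.map closeOf).reverse) with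
      | none => 0
      | some b => bScore.getD b 0 := by
  induction cs with
  | nil => intro stack _; simp [lineScoreA, scan]
  | cons c cs ih =>
    intro stack hst
    have hc : c ∈ brackets := hcs c (by simp)
    have hcs' : ∀ x ∈ cs, x ∈ brackets := fun x hx => hcs x (by simp [hx])
    simp only [lineScoreA, scan, open_bOpen c hc]
    by_cases ho : openers.contains c = true
    · rw [if_pos ho, if_pos ho]
      have hst' : ∀ x ∈ stack ++ [c], x ∈ openers := by
        intro x hx
        rcases List.mem_append.mp hx with h | h
        · exact hst x h
        · simp at h; subst h; simpa using ho
      rw [ih hcs' (stack ++ [c]) hst']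
      congr 1
      simp
    · have ho' : openers.contains c = false := by simpa using ho
      rw [if_neg ho, if_neg ho]
      rcases List.eq_nil_or_concat stack with rfl | ⟨init, t, rfl⟩
      · simp only [List.map_nil, List.reverse_nil]
        rw [if_neg (by simp)]
        exact score_eq c hc ho'
      · simp only [List.concat_eq_append] at hst ⊢
        have ht : t ∈ openers := hst t (by simp)
        have hget : PySem.List.pyGet? (init ++ [t]) (((init ++ [t]).length : Int) - 1) = some t := by
          have h1 : (((init ++ [t]).length : Int) - 1) = ((init.length : Nat) : Int) := by
            simp
          rw [h1, PySem.List.pyGet?_natCast]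
          simp
        rw [hget]
        have hrev : (((init ++ [t]).map closeOf).reverse) = closeOf t :: (init.map closeOf).reverse := by
          simp
        rw [hrev]
        have hcond : (0 < (init ++ [t]).length ∧
            getParenType ((some t).getD ' ') = getParenType c) ↔ (c = closeOf t) := by
          simp only [Option.getD_some, List.length_append, List.length_cons]
          constructor
          · rintro ⟨_, h⟩; exact (pop_iff t c ht hc ho').mp h
          · intro h; exact ⟨by simp, (pop_iff t c ht hc ho').mpr h⟩
        by_cases hceq : c = closeOf t
        · rw [if_pos (hcond.mpr hceq)]
          have hd : (init ++ [t]).dropLast = init := by simp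
          rw [hd, ih hcs' init (fun x hx => hst x (by simp [hx]))]
          simp [← hceq]
        · rw [if_neg (fun h => hceq (hcond.mp h))]
          simpa [hceq] using score_eq c hc ho'


theorem seqB_suffix : ∀ (n : Nat) (cs r : List Char), seqB n cs = .inr r → r.length ≤ cs.length := by
  intro n
  induction n with
  | zero =>
    intro cs r h
    cases cs <;> simp [seqB] at h <;> simp [← h]
  | succ n ih =>
    intro cs r h
    cases cs with
    | nil => simp [seqB] at h; simp [← h]
    | cons c cs =>
      simp only [seqB] at h
      by_cases hc : bOpen.contains c = true
      · simp only [hc, if_true] at h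
        rcases h1 : seqB n cs with b | r1
        · rw [h1] at h; cases h
        · rw [h1] at h
          cases r1 with
          | nil => simp at h; simp [h]
          | cons d rest =>
            have h2 := ih cs _ h1
            simp only at h
            by_cases hd : d = bOpen.getD c ' '
            · simp only [hd, if_true] at h
              have h3 := ih rest r h
              simp at h2; simp; omega
            · rw [if_neg hd] at h; cases h
      · simp only [hc] at h
        simp at h; simp [← h]

theorem scan_seqB : ∀ (n : Nat) (cs : List Char), cs.length ≤ n → ∀ es : List Char,
    scan cs es =
      match seqB n cs with
      | .inl b => some b
      | .inr [] => none
      | .inr (d :: rest) =>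
        match es with
        | [] => some d
        | e :: es' => if d = e then scan rest es' else some d := by
  intro n
  induction n with
  | zero =>
    intro cs hlen es
    have : cs = [] := List.eq_nil_of_length_eq_zero (Nat.le_zero.mp hlen)
    subst this; simp [scan, seqB]
  | succ n ih =>
    intro cs hlen es
    cases cs with
    | nil => simp [scan, seqB]
    | cons c cs =>
      simp only [List.length_cons, Nat.add_le_add_iff_right] at hlen
      simp only [scan, seqB]
      by_cases hc : bOpen.contains c = true
      · simp only [hc, if_true]
        rw [ih cs hlen (closeOf c :: es)]
        rcases h1 : seqB n cs with b | r1
        · rfl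
        · cases r1 with
          | nil => rfl
          | cons d rest =>
            have h2 : rest.length ≤ n := by
              have := seqB_suffix n cs _ h1; simp at this; omega
            simp only [closeOf]
            by_cases hd : d = bOpen.getD c ' '
            · simp only [hd, if_true]
              exact ih rest h2 es
            · simp only [if_neg hd]
      · simp only [hc]
        cases es <;> rfl

theorem line_eq (cs : List Char) (h : ∀ c ∈ cs, c ∈ brackets) :
    lineScoreA pondLit openers cs [] =
      match seqB cs.length cs with
      | .inl b => bScore.getD b 0
      | .inr [] => 0
      | .inr (d :: _) => bScore.getD d 0 := by
  have h1 := A_line cs h [] (by simp)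
  simp only [List.map_nil, List.reverse_nil] at h1
  rw [h1, scan_seqB cs.length cs le_rfl []]
  rcases seqB cs.length cs with b | r
  · rfl
  · cases r <;> rfl

theorem fold_eq : ∀ (lines : List String),
    (∀ line ∈ lines, ∀ c ∈ line.toList, c ∈ brackets) → ∀ t : Int,
    lines.foldl (fun total line => total + lineScoreA pondLit openers line.toList []) t =
    lines.foldl (fun total line =>
      match seqB line.toList.length line.toList with
      | .inl b => total + bScore.getD b 0
      | .inr [] => total
      | .inr (d :: _) => total + bScore.getD d 0) t := by
  intro lines
  induction lines with
  | nil => intro _ t; rfl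
  | cons l ls ih =>
    intro h t
    simp only [List.foldl_cons]
    have hl := line_eq l.toList (h l (by simp))
    have hr : (match seqB l.toList.length l.toList with
        | .inl b => t + bScore.getD b 0
        | .inr [] => t
        | .inr (d :: _) => t + bScore.getD d 0) =
        t + (match seqB l.toList.length l.toList with
        | .inl b => bScore.getD b 0
        | .inr [] => 0
        | .inr (d :: _) => bScore.getD d 0) := by
      rcases seqB l.toList.length l.toList with b | r
      · rfl
      · cases r
        · simp
        · rfl
    rw [hr, ← hl]
    exact ih (fun x hx => h x (by simp [hx])) _

-- ===== VERDICT (by name: the statement is the Claim_ definition above) =====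
theorem part1_spec : Claim_equal_part1 := by
  intro input_lines _hdom hpre
  unfold Spec_part1
  have h0 : part1 input_lines =
      input_lines.foldl (fun total line => total + lineScoreA pondLit openers line.toList []) 0 := rfl
  rw [h0]
  refine fold_eq input_lines (fun l hl c hc => ?_) 0
  have h1 := (List.all_eq_true.mp (hpre l hl)) c hc
  simpa [brackets] using h1
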